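-- pv_equiv track=rewrite | github.com/1712162/Path-Finding-Algorithm-School-Project | Graph2D.py | __create_coordinate
-- ===== SOURCE A (Python) =====
-- def __create_coordinate(width,height):
-- 	coordinate=[[0 for j in range(width+1)] for i in range(height+1)] #init coordinate(0) with width and height
--
-- 	for i in range(height+1):
-- 		coordinate[i][0]=1
-- 		coordinate[i][width]=1
--
-- 	for i in range(width+1):
-- 		coordinate[0][i]=1
-- 		coordinate[height][i]=1
-- 	return coordinate
-- ===== SOURCE B (Python) =====
-- def __create_coordinate(width, height):
--     solid = [1] * (width + 1)
--     if height < 1: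
--         return [solid[:] for _ in range(height + 1)]
--     if width >= 1:
--         hollow = [1] + [0] * (width - 1) + [1]
--     else:
--         hollow = solid
--     return [solid] + [hollow[:] for _ in range(height - 1)] + [solid[:]]
-- ===== Notes on version B (the rewrite author's own statement) =====
-- stated objective: alternative
-- what changed: B never iterates over cells at all: it builds the two distinct row shapes once (a solid all-ones row and a hollow 1,0...,0,1 row) by list replication/concatenation and assembles the grid as top row + replicated interior rows + bottom row, instead of A's per-cell zero grid followed by two border-patching loops.
-- outside the precondition, e.g. on __create_coordinate(-1, 2): A raises IndexError, B returns [[], [], []]; on __create_coordinate(2, -1): A raises IndexError, B returns []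
import Mathlib
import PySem

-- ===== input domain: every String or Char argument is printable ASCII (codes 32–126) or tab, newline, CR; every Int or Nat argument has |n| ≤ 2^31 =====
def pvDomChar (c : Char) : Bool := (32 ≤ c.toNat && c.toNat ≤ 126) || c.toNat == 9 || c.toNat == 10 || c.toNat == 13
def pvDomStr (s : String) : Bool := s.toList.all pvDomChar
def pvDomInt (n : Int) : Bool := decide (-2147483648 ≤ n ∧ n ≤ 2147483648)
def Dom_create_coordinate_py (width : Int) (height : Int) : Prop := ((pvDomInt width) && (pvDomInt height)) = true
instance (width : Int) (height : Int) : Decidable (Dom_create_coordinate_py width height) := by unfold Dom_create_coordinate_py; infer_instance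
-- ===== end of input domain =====

-- B builds the two distinct row shapes once by replication/concatenation and assembles the grid
-- as top row + replicated interior rows + bottom row, instead of A's per-cell zero grid plus two
-- border-patching loops.


-- ===== PORT A =====
-- Python 'c[i][j] = v': read row c[i], set position j, write the row back (exact inside Pre_,
-- where every index the loops touch is in range).
def pySetCell (c : List (List Int)) (i j v : Int) : List (List Int) :=
  PySem.List.pySetD c i (PySem.List.pySetD (PySem.List.pyGetD c i []) j v)

def create_coordinate_py (width : Int) (height : Int) : List (List Int) :=
  let c0 := (PySem.List.pyRange 0 (height+1) 1).map
              (fun _i => (PySem.List.pyRange 0 (width+1) 1).map (fun _j => (0:Int)))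
  let c1 := (PySem.List.pyRange 0 (height+1) 1).foldl
              (fun c i => pySetCell (pySetCell c i 0 1) i width 1) c0
  let c2 := (PySem.List.pyRange 0 (width+1) 1).foldl
              (fun c i => pySetCell (pySetCell c 0 i 1) height i 1) c1
  c2

-- ===== PORT B =====
-- 'solid' is Python's [1]*(width+1), 'hollow' is [1]+[0]*(width-1)+[1]; list*n with n ≤ 0 is
-- empty, which is exactly .toNat clamping. Python's row copies hollow[:]/solid[:] are identity
-- on values.
def create_coordinate_py_alt (width : Int) (height : Int) : List (List Int) :=
  let solid := List.replicate (width + 1).toNat (1 : Int)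
  if height < 1 then
    List.replicate (height + 1).toNat solid
  else
    let hollow := if 1 ≤ width then [1] ++ List.replicate (width - 1).toNat (0 : Int) ++ [1]
                  else solid
    [solid] ++ List.replicate (height - 1).toNat hollow ++ [solid]

-- ===== PRECONDITION & SPEC =====
-- Pre_ excludes exactly the inputs where A raises IndexError: when exactly one of width, height
-- is negative, the patch loops index an empty grid or empty rows.
def Pre_create_coordinate_py (width : Int) (height : Int) : Prop :=
  (0 ≤ width ∧ 0 ≤ height) ∨ (width < 0 ∧ height < 0)
instance (width : Int) (height : Int) : Decidable (Pre_create_coordinate_py width height) := by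
  unfold Pre_create_coordinate_py; infer_instance
def pvWitness_create_coordinate_py : Int × Int := (2, 3)

def Spec_create_coordinate_py (width : Int) (height : Int) (out : List (List Int)) : Prop :=
  out = create_coordinate_py_alt width height
instance (width : Int) (height : Int) (out : List (List Int)) : Decidable (Spec_create_coordinate_py width height out) := by
  unfold Spec_create_coordinate_py; infer_instance

-- ===== CLAIM (what is proved, stated in full; the proofs are below) =====
def Claim_equal_create_coordinate_py : Prop := ∀ (width : Int) (height : Int), Dom_create_coordinate_py width height → Pre_create_coordinate_py width height → Spec_create_coordinate_py width height (create_coordinate_py width height)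

-- ===== LEMMAS AND PROOFS =====

-- the two row shapes B's port builds, as functions of the nonnegative width
def solidRow (w' : Nat) : List Int := List.replicate (w' + 1) (1 : Int)
def hollowRow (w' : Nat) : List Int :=
  if 1 ≤ w' then 1 :: (List.replicate (w' - 1) (0 : Int) ++ [1]) else solidRow w'

theorem modify_modify_same {α : Type} (l : List α) (i : Nat) (f g : α → α) :
    (l.modify i f).modify i g = l.modify i (fun a => g (f a)) := by
  apply List.ext_getElem?
  intro k
  simp only [List.getElem?_modify]
  cases l[k]? with
  | none => rfl
  | some a => by_cases h : i = k <;> simp [h]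

theorem pySetCell_eq_modify (c : List (List Int)) (k : Nat) (j v : Int) (hj : 0 ≤ j) :
    pySetCell c (k : Int) j v = c.modify k (fun r => r.set j.toNat v) := by
  unfold pySetCell
  rw [PySem.List.pySetD_natCast, PySem.List.pyGetD_natCast, PySem.List.pySetD_of_nonneg _ _ hj]
  by_cases hk : k < c.length
  · rw [List.getD_eq_getElem _ _ hk]
    apply List.ext_getElem?
    intro m
    rw [List.getElem?_modify, List.getElem?_set]
    by_cases hm : k = m
    · subst hm; simp [hk]
    · simp [hm]
  · rw [List.set_eq_of_length_le (by omega), List.modify_eq_self (by omega)]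

theorem foldl_modify_getElem? {α : Type} (f : Nat → α → α) :
    ∀ (idxs : List Nat), idxs.Nodup → ∀ (l : List α) (k : Nat),
      (idxs.foldl (fun c i => c.modify i (f i)) l)[k]? =
        if k ∈ idxs then l[k]?.map (f k) else l[k]? := by
  intro idxs
  induction idxs with
  | nil => intro _ l k; simp
  | cons i rest ih =>
    intro hnd l k
    simp only [List.foldl_cons]
    rw [ih hnd.of_cons]
    rw [List.getElem?_modify]
    cases l[k]? with
    | none => by_cases hkr : k ∈ rest <;> simp [hkr]
    | some a =>
      by_cases hkr : k ∈ rest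
      · have hki : ¬ i = k := fun h => (List.nodup_cons.mp hnd).1 (h ▸ hkr)
        simp [hkr, hki]
      · by_cases hki : k = i
        · subst hki; simp [hkr]
        · simp [hkr, hki, Ne.symm hki]

theorem foldl_two_modify {α : Type} (h : Nat) (g : Nat → α → α)
    (hg : ∀ j a, g j (g j a) = g j a) :
    ∀ (idxs : List Nat) (l : List α) (k : Nat),
      (idxs.foldl (fun c j => (c.modify 0 (g j)).modify h (g j)) l)[k]? =
        if k = 0 ∨ k = h then l[k]?.map (fun r => idxs.foldl (fun r j => g j r) r) else l[k]? := by
  intro idxs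
  induction idxs with
  | nil =>
    intro l k
    by_cases hk : k = 0 ∨ k = h <;> simp [hk]
  | cons j rest ih =>
    intro l k
    simp only [List.foldl_cons]
    rw [ih]
    rw [List.getElem?_modify, List.getElem?_modify]
    cases l[k]? with
    | none => by_cases hk : k = 0 ∨ k = h <;> simp [hk]
    | some a =>
      by_cases h0 : k = 0
      · subst h0
        by_cases hh : h = 0
        · subst hh; simp [hg]
        · simp [hh]
      · by_cases hh : k = h
        · subst hh; simp [Ne.symm h0]
        · simp [h0, hh, Ne.symm h0, show ¬ h = k from fun hx => hh hx.symm]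

theorem rowOnes (w' : Nat) (r : List Int) (hr : r.length = w' + 1) :
    (List.range (w' + 1)).foldl (fun r j => r.set j 1) r = solidRow w' := by
  have hset : (fun (r : List Int) (j : Nat) => r.set j 1)
      = fun r j => r.modify j (fun _ => (1:Int)) := by
    funext r j; rw [List.modify_eq_set]
  rw [hset]
  apply List.ext_getElem?
  intro k
  rw [foldl_modify_getElem? (fun _ _ => (1:Int)) _ List.nodup_range r k]
  unfold solidRow
  by_cases hk : k < w' + 1
  · have : r[k]? = some (r[k]'(by omega)) := List.getElem?_eq_getElem _
    simp [hk, this]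
  · have h1 : r[k]? = none := List.getElem?_eq_none (by omega)
    simp [hk, h1]

theorem rowMid (w' : Nat) :
    ((List.replicate (w' + 1) (0:Int)).set 0 1).set w' 1 = hollowRow w' := by
  unfold hollowRow solidRow
  cases w' with
  | zero => decide
  | succ n =>
    simp only [show 1 ≤ n + 1 by omega, if_true, Nat.add_sub_cancel]
    rw [List.replicate_succ, List.set_cons_zero, List.set_cons_succ]
    congr 1
    rw [List.replicate_succ', List.set_append]
    simp

theorem sandwich_getElem? {α : Type} (a b : α) (n k : Nat) :
    ([a] ++ List.replicate n b ++ [a])[k]? =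
      if k = 0 ∨ k = n + 1 then some a else if k < n + 1 then some b else none := by
  rw [List.append_assoc, List.getElem?_append]
  by_cases hk0 : k < 1
  · have : k = 0 := by omega
    subst this; simp
  · rw [if_neg (by simpa using hk0), List.getElem?_append]
    simp only [List.length_replicate, List.length_cons, List.length_nil, Nat.zero_add]
    by_cases hkm : k - 1 < n
    · rw [if_pos hkm, List.getElem?_replicate, if_pos hkm]
      have h1 : ¬ (k = 0 ∨ k = n + 1) := by omega
      have h2 : k < n + 1 := by omega
      simp [h1, h2]
    · rw [if_neg hkm]
      by_cases hke : k = n + 1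
      · subst hke
        simp
      · have h1 : ¬ (k = 0 ∨ k = n + 1) := by omega
        have h2 : ¬ k < n + 1 := by omega
        have h3 : 1 ≤ k - 1 - n := by omega
        rw [List.getElem?_eq_none (by simpa using h3)]
        simp [h1, h2]

theorem alt_getElem? (w' h' : Nat) (k : Nat) :
    (create_coordinate_py_alt (w' : Int) (h' : Int))[k]? =
      if k < h' + 1 then some (if k = 0 ∨ k = h' then solidRow w' else hollowRow w') else none := by
  unfold create_coordinate_py_alt
  have hw1 : ((w' : Int) + 1).toNat = w' + 1 := by omega
  rw [hw1]
  cases h' with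
  | zero =>
    rw [if_pos (by norm_num)]
    norm_num [solidRow]
    cases k with
    | zero => simp
    | succ m => simp
  | succ s =>
    rw [if_neg (by push_cast; omega)]
    have hh1 : ((s : Int) + 1 - 1).toNat = s := by omega
    have hrow : (if 1 ≤ (w' : Int) then [1] ++ List.replicate ((w' : Int) - 1).toNat (0:Int) ++ [1]
        else List.replicate (w' + 1) (1:Int)) = hollowRow w' := by
      unfold hollowRow solidRow
      by_cases hw : 1 ≤ w'
      · rw [if_pos (by exact_mod_cast hw), if_pos hw]
        have : ((w' : Int) - 1).toNat = w' - 1 := by omega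
        rw [this]; rfl
      · rw [if_neg (by exact_mod_cast hw), if_neg hw]
    push_cast
    rw [hh1, hrow]
    rw [show ([List.replicate (w'+1) (1:Int)] ++ List.replicate s (hollowRow w') ++ [List.replicate (w'+1) (1:Int)])
        = ([(solidRow w')] ++ List.replicate s (hollowRow w') ++ [solidRow w']) from rfl]
    rw [sandwich_getElem?]
    by_cases hb : k = 0 ∨ k = s + 1
    · rw [if_pos hb, if_pos (by omega), if_pos hb]
    · rw [if_neg hb]
      by_cases hk : k < s + 1
      · rw [if_pos hk, if_pos (by omega), if_neg hb]
      · rw [if_neg hk, if_neg (by omega)]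

theorem equal_nonneg (w' h' : Nat) :
    create_coordinate_py (w' : Int) (h' : Int) = create_coordinate_py_alt (w' : Int) (h' : Int) := by
  unfold create_coordinate_py
  have hr : ∀ (n : Nat), PySem.List.pyRange 0 ((n : Int) + 1) 1
      = List.map (Nat.cast : Nat → Int) (List.range (n + 1)) := by
    intro n
    rw [PySem.List.pyRange_one]
    have hn : ((n : Int) + 1 - 0).toNat = n + 1 := by omega
    rw [hn]
    exact List.map_congr_left (fun k _ => zero_add _)
  simp only [hr, List.foldl_map, List.map_map]
  have hc0 : (List.range (h' + 1)).map
        ((fun _i => (List.range (w' + 1)).map ((fun _j => (0:Int)) ∘ (Nat.cast : Nat → Int))) ∘ (Nat.cast : Nat → Int))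
      = List.replicate (h' + 1) (List.replicate (w' + 1) (0:Int)) := by
    simp [Function.comp_def, List.map_const']
  rw [hc0]
  have hstep1 : (fun (c : List (List Int)) (k : Nat) =>
        pySetCell (pySetCell c (k : Int) 0 1) (k : Int) (w' : Int) 1)
      = fun c k => c.modify k (fun r => (r.set 0 1).set w' 1) := by
    funext c k
    rw [pySetCell_eq_modify _ _ _ _ (by omega), pySetCell_eq_modify _ _ _ _ (by omega),
      modify_modify_same]
    simp
  have hstep2 : (fun (c : List (List Int)) (k : Nat) =>
        pySetCell (pySetCell c 0 (k : Int) 1) (h' : Int) (k : Int) 1)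
      = fun c k => (c.modify 0 (fun r => r.set k 1)).modify h' (fun r => r.set k 1) := by
    funext c k
    have h0 : (0 : Int) = ((0 : Nat) : Int) := rfl
    rw [h0, pySetCell_eq_modify _ _ _ _ (by omega), pySetCell_eq_modify _ _ _ _ (by omega)]
    simp
  rw [show (fun (c : List (List Int)) (x : Nat) => pySetCell (pySetCell c ↑x 0 1) ↑x ↑w' 1)
        = fun c k => c.modify k (fun r => (r.set 0 1).set w' 1) from hstep1,
      show (fun (c : List (List Int)) (x : Nat) => pySetCell (pySetCell c 0 ↑x 1) ↑h' ↑x 1)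
        = fun c k => (c.modify 0 (fun r => r.set k 1)).modify h' (fun r => r.set k 1) from hstep2]
  apply List.ext_getElem?
  intro k
  have L2 : ∀ (l : List (List Int)) (k : Nat),
      ((List.range (w' + 1)).foldl
          (fun c j => (c.modify 0 (fun r => r.set j 1)).modify h' (fun r => r.set j 1)) l)[k]? =
        if k = 0 ∨ k = h' then l[k]?.map (fun r => (List.range (w' + 1)).foldl (fun r j => r.set j 1) r)
        else l[k]? :=
    fun l k => foldl_two_modify h' (fun j r => r.set j 1) (fun j a => List.set_set 1) _ l k
  have L1 : ∀ (l : List (List Int)) (k : Nat),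
      ((List.range (h' + 1)).foldl (fun c i => c.modify i (fun r => (r.set 0 1).set w' 1)) l)[k]? =
        if k ∈ List.range (h' + 1) then l[k]?.map (fun r => (r.set 0 1).set w' 1) else l[k]? :=
    fun l k => foldl_modify_getElem? _ _ List.nodup_range l k
  rw [L2, L1, alt_getElem?]
  by_cases hk : k < h' + 1
  · rw [if_pos hk]
    simp only [List.mem_range, hk, if_true, List.getElem?_replicate, Option.map_some]
    by_cases hb : k = 0 ∨ k = h'
    · simp only [hb, if_true, Option.some.injEq]
      rw [rowMid w', rowOnes w' _ ?hlen]
      case hlen =>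
        unfold hollowRow solidRow
        by_cases hw : 1 ≤ w' <;> simp [hw]
    · simp only [hb, if_false, Option.some.injEq]
      exact rowMid w'
  · simp [hk]

-- ===== VERDICT (by name: the statement is the Claim_ definition above) =====
theorem create_coordinate_py_spec : Claim_equal_create_coordinate_py := by
  intro width height _ hpre
  unfold Spec_create_coordinate_py
  rcases hpre with ⟨hw, hh⟩ | ⟨hw, hh⟩
  · obtain ⟨w', rfl⟩ := Int.eq_ofNat_of_zero_le hw
    obtain ⟨h', rfl⟩ := Int.eq_ofNat_of_zero_le hh
    exact equal_nonneg w' h'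
  · unfold create_coordinate_py create_coordinate_py_alt
    rw [PySem.List.pyRange_one_eq_nil (by omega), PySem.List.pyRange_one_eq_nil (by omega)]
    simp [if_pos (by omega : height < 1), show (height + 1).toNat = 0 by omega]
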